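-- pv_equiv track=rewrite | github.com/NOAA-OWP/ras2fim | src/nws_ble2fim_main_metric.py | fn_format_flow_values
-- ===== SOURCE A (Python) =====
-- def fn_format_flow_values(list_flow):
--
--     int_number_of_profiles = len(list_flow)
--     str_all_flows = ''
--
--     int_number_of_new_rows = int((int_number_of_profiles // 10) + 1)
--     int_items_in_new_last_row = int_number_of_profiles % 10
--
--     # write out new rows of 10 grouped flows
--     if int_number_of_new_rows > 1:
--         # write out the complete row of 10
--         for j in range(int_number_of_new_rows - 1):
--             str_flow = ''
--             for k in range(10):
--                 int_Indexvalue = j*10 + k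
--                 # format to 8 characters that are right alligned
--                 str_current_flow = '{:>8}'.format(
--                     str(list_flow[int_Indexvalue]))
--                 str_flow = str_flow + str_current_flow
--             str_all_flows += str_flow + '\n'
--
--     # write out the last row
--     str_flow_last_row = ''
--     for j in range(int_items_in_new_last_row):
--         int_indexvalue = (int_number_of_new_rows-1) * 10 + j
--         str_current_flow = '{:>8}'.format(str(list_flow[int_indexvalue]))
--         str_flow_last_row += str_current_flow
--     str_all_flows += str_flow_last_row
--
--     return (str_all_flows)
-- ===== SOURCE B (Python) =====
-- def fn_format_flow_values(list_flow):
--     num_rows = len(list_flow) // 10 + 1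
--     rows = []
--     for i in range(num_rows):
--         chunk = list_flow[i * 10:(i + 1) * 10]
--         rows.append(''.join('{:>8}'.format(str(x)) for x in chunk))
--     return '\n'.join(rows)
-- ===== Notes on version B (the rewrite author's own statement) =====
-- stated objective: simpler
-- what changed: Replaces A's two-phase structure (a guarded loop over complete rows using j*10+k index arithmetic plus a separate last-row loop, accumulating '\n' after each full row) with a single uniform loop over slices of 10, formatting each chunk and joining the rows with '\n'.
import Mathlib
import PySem

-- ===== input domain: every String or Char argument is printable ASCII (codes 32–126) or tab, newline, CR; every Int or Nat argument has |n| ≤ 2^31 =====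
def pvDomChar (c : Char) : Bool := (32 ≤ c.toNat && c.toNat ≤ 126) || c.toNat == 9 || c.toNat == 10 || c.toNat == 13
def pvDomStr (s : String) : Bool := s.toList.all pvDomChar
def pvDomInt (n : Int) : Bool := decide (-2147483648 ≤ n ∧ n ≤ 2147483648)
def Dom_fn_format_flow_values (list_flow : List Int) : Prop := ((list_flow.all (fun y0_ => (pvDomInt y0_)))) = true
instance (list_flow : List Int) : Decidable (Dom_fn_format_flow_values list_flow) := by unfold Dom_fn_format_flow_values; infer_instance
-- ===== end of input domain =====

-- B replaces A's two-phase layout (full-rows loop with j*10+k index math, then a separate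
-- last-row loop) by one uniform chunking loop over slices joined with '\n' (objective: simpler).


-- '{:>8}'.format(str(x)) : right-align str(x) in 8 characters (shared by both ports)
def pvFmt8 (x : Int) : String :=
  let s := PySem.Int.toChars x
  String.ofList (List.replicate (8 - s.length) ' ' ++ s)

-- ===== PORT A =====
def fn_format_flow_values (list_flow : List Int) : String :=
  let int_number_of_profiles : Int := list_flow.length
  let str_all_flows : String := ""
  let int_number_of_new_rows : Int := PySem.Int.floordiv int_number_of_profiles 10 + 1
  let int_items_in_new_last_row : Int := PySem.Int.mod int_number_of_profiles 10
  -- if int_number_of_new_rows > 1: for j in range(...): inner for k in range(10)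
  let str_all_flows :=
    if int_number_of_new_rows > 1 then
      (PySem.List.pyRange 0 (int_number_of_new_rows - 1) 1).foldl (fun acc j =>
        let str_flow := (PySem.List.pyRange 0 10 1).foldl (fun sf k =>
          sf ++ pvFmt8 (PySem.List.pyGetD list_flow (j * 10 + k) 0)) ""
        acc ++ (str_flow ++ "\n")) str_all_flows
    else str_all_flows
  -- last row (indices always in range, so pyGetD with an unused default is exact)
  let str_flow_last_row := (PySem.List.pyRange 0 int_items_in_new_last_row 1).foldl (fun sf j =>
    sf ++ pvFmt8 (PySem.List.pyGetD list_flow ((int_number_of_new_rows - 1) * 10 + j) 0)) ""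
  str_all_flows ++ str_flow_last_row

-- ===== PORT B =====
def fn_format_flow_values_alt (list_flow : List Int) : String :=
  let num_rows : Int := PySem.Int.floordiv (list_flow.length : Int) 10 + 1
  let rows := (PySem.List.pyRange 0 num_rows 1).map (fun i =>
    PySem.Str.join "" ((PySem.List.slice list_flow (some (i * 10)) (some ((i + 1) * 10))).map pvFmt8))
  PySem.Str.join "\n" rows

-- ===== PRECONDITION & SPEC =====
def Spec_fn_format_flow_values (list_flow : List Int) (out : String) : Prop := out = fn_format_flow_values_alt list_flow
instance (list_flow : List Int) (out : String) : Decidable (Spec_fn_format_flow_values list_flow out) := by unfold Spec_fn_format_flow_values; infer_instance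

-- ===== CLAIM (what is proved, stated in full; the proofs are below) =====
def Claim_equal_fn_format_flow_values : Prop := ∀ (list_flow : List Int), Dom_fn_format_flow_values list_flow → Spec_fn_format_flow_values list_flow (fn_format_flow_values list_flow)

-- ===== LEMMAS AND PROOFS =====

-- characters of one formatted value
def pvF (x : Int) : List Char := (pvFmt8 x).toList

-- a string-append foldl is init ++ the flatMap of the pieces
lemma pvFoldlAppend {α : Type} (l : List α) (f : α → String) (init : String) :
    (l.foldl (fun acc x => acc ++ f x) init).toList
      = init.toList ++ l.flatMap (fun x => (f x).toList) := by
  induction l generalizing init with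
  | nil => simp
  | cons a l ih => simp [ih, String.toList_append]

-- indexed reads over a range are the chunk itself
lemma pvRangeGetD (xs : List Int) (a m : Nat) (h : a + m ≤ xs.length) :
    (List.range m).flatMap (fun k => pvF (xs.getD (a + k) 0))
      = ((xs.drop a).take m).flatMap pvF := by
  induction m generalizing a with
  | zero => simp
  | succ m ih =>
    have ha : a < xs.length := by omega
    have hdrop : xs.drop a = xs[a] :: xs.drop (a + 1) := List.drop_eq_getElem_cons ha
    rw [List.range_succ_eq_map]
    simp only [List.flatMap_cons, List.flatMap_map, hdrop, List.take_succ_cons,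
      List.flatMap_cons]
    congr 1
    · simp [List.getD, List.getElem?_eq_getElem ha]
    · have := ih (a + 1) (by omega)
      simpa [Nat.add_assoc, Nat.add_comm 1] using this
  
-- join with "" is flatten
lemma pvJoinNil (l : List (List Char)) : PySem.Chars.join [] l = l.flatten := by
  induction l with
  | nil => simp [PySem.Chars.join_nil]
  | cons a l ih =>
    cases l with
    | nil => simp [PySem.Chars.join_singleton]
    | cons b t => rw [PySem.Chars.join_cons_cons]; simp_all

-- join sep (l ++ [x]) unrolls to a flatMap of (piece ++ sep) plus the last piece
lemma pvJoinSnoc (sep : List Char) (l : List (List Char)) (x : List Char) :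
    PySem.Chars.join sep (l ++ [x]) = l.flatMap (fun p => p ++ sep) ++ x := by
  induction l with
  | nil => simp [PySem.Chars.join_singleton]
  | cons a l ih =>
    cases hl : l ++ [x] with
    | nil => simp at hl
    | cons b t =>
      rw [List.cons_append, hl, PySem.Chars.join_cons_cons, ← hl, ih]
      simp

-- A's characters, chunk form
lemma pvAChars (xs : List Int) :
    (fn_format_flow_values xs).toList
      = (List.range (xs.length / 10)).flatMap
          (fun j => ((xs.drop (j * 10)).take 10).flatMap pvF ++ ['\n'])
        ++ (xs.drop (xs.length / 10 * 10)).flatMap pvF := by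
  simp only [fn_format_flow_values]
  have h10 : (10 : Int) = ((10 : Nat) : Int) := by norm_num
  rw [h10, PySem.Int.floordiv_natCast, PySem.Int.mod_natCast]
  set n := xs.length with hn
  set q := n / 10 with hq
  set r := n % 10 with hr
  have hdm : q * 10 + r = n := by rw [hq, hr]; omega
  have hrlt : r < 10 := Nat.mod_lt n (by norm_num)
  -- the if-branch is the fold regardless of the condition
  have hcast : ((q : Int) + 1 - 1) = ((q : Nat) : Int) := by ring
  have hbranch :
      (if ((q : Int) + 1 > 1) then
        (PySem.List.pyRange 0 ((q : Int) + 1 - 1) 1).foldl (fun acc j =>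
          acc ++ (((PySem.List.pyRange 0 ((10:Nat):Int) 1).foldl (fun sf k =>
            sf ++ pvFmt8 (PySem.List.pyGetD xs (j * ((10:Nat):Int) + k) 0)) "") ++ "\n")) ""
      else "")
      = (PySem.List.pyRange 0 ((q : Nat) : Int) 1).foldl (fun acc j =>
          acc ++ (((PySem.List.pyRange 0 ((10:Nat):Int) 1).foldl (fun sf k =>
            sf ++ pvFmt8 (PySem.List.pyGetD xs (j * ((10:Nat):Int) + k) 0)) "") ++ "\n")) "" := by
    rw [hcast]
    split_ifs with hgt
    · rfl
    · have hq0 : q = 0 := by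
        by_contra h
        exact hgt (by omega)
      simp [hq0, PySem.List.pyRange_zero]
  rw [hbranch, String.toList_append]
  congr 1
  · -- full rows
    rw [pvFoldlAppend]
    rw [PySem.List.pyRange_zero_natCast q, List.flatMap_map]
    have hemp : ("" : String).toList = ([] : List Char) := by simp
    rw [hemp, List.nil_append]
    apply List.flatMap_congr
    intro j hj
    have hjq : j < q := List.mem_range.mp hj
    rw [String.toList_append, pvFoldlAppend]
    have hnl : ("\n" : String).toList = ['\n'] := by simp
    have hemp2 : ("" : String).toList = ([] : List Char) := by simp
    rw [hnl, hemp2, List.nil_append]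
    refine congrArg (fun t => t ++ ['\n']) ?_
    rw [PySem.List.pyRange_zero_natCast 10, List.flatMap_map]
    have hinner : ∀ k ∈ List.range 10,
        (pvFmt8 (PySem.List.pyGetD xs ((j : Int) * ((10:Nat):Int) + (k : Int)) 0)).toList
          = pvF (xs.getD (j * 10 + k) 0) := by
      intro k _
      have : ((j : Int) * ((10:Nat):Int) + (k : Int)) = ((j * 10 + k : Nat) : Int) := by push_cast; ring
      rw [this, PySem.List.pyGetD_natCast]
      rfl
    rw [List.flatMap_congr hinner]
    exact pvRangeGetD xs (j * 10) 10 (by omega)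
  · -- last row
    rw [pvFoldlAppend]
    have hemp : ("" : String).toList = ([] : List Char) := by simp
    rw [hemp, List.nil_append]
    rw [hcast, PySem.List.pyRange_zero_natCast r, List.flatMap_map]
    have hinner : ∀ k ∈ List.range r,
        (pvFmt8 (PySem.List.pyGetD xs (((q : Nat) : Int) * ((10:Nat):Int) + (k : Int)) 0)).toList
          = pvF (xs.getD (q * 10 + k) 0) := by
      intro k _
      have : (((q : Nat) : Int) * ((10:Nat):Int) + (k : Int)) = ((q * 10 + k : Nat) : Int) := by push_cast; ring
      rw [this, PySem.List.pyGetD_natCast]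
      rfl
    rw [List.flatMap_congr hinner, pvRangeGetD xs (q * 10) r (by omega)]
    congr 1
    apply List.take_of_length_le
    rw [List.length_drop]
    omega

-- B's characters, chunk form
lemma pvBChars (xs : List Int) :
    (fn_format_flow_values_alt xs).toList
      = (List.range (xs.length / 10)).flatMap
          (fun j => ((xs.drop (j * 10)).take 10).flatMap pvF ++ ['\n'])
        ++ (xs.drop (xs.length / 10 * 10)).flatMap pvF := by
  simp only [fn_format_flow_values_alt]
  have h10 : (10 : Int) = ((10 : Nat) : Int) := by norm_num
  rw [h10, PySem.Int.floordiv_natCast]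
  set n := xs.length with hn
  set q := n / 10 with hq
  have hrow : ∀ j : Nat,
      (PySem.Str.join "" ((PySem.List.slice xs (some ((j : Int) * ((10:Nat):Int)))
          (some (((j : Int) + 1) * ((10:Nat):Int)))).map pvFmt8)).toList
        = ((xs.drop (j * 10)).take 10).flatMap pvF := by
    intro j
    have h1 : ((j : Int) * ((10:Nat):Int)) = ((j * 10 : Nat) : Int) := by push_cast; ring
    have h2 : (((j : Int) + 1) * ((10:Nat):Int)) = ((j * 10 + 10 : Nat) : Int) := by push_cast; ring
    rw [h1, h2, PySem.List.slice_natCast]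
    have h3 : j * 10 + 10 - j * 10 = 10 := by omega
    rw [h3, PySem.Str.toList_join, List.map_map]
    have hsep : ("" : String).toList = [] := by simp
    rw [hsep, pvJoinNil, List.flatten_eq_flatMap, List.flatMap_map]
    rfl
  have hq1 : ((q : Int) + 1) = (((q + 1 : Nat)) : Int) := by push_cast; ring
  rw [hq1, PySem.List.pyRange_zero_natCast, List.map_map, PySem.Str.toList_join, List.map_map]
  have hnl : ("\n" : String).toList = ['\n'] := by simp
  rw [hnl]
  have hmaps : (List.range (q + 1)).map
      ((fun s => String.toList s) ∘ (fun i => PySem.Str.join ""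
        ((PySem.List.slice xs (some (i * ((10:Nat):Int))) (some ((i + 1) * ((10:Nat):Int)))).map pvFmt8)) ∘ (fun k : Nat => (k : Int)))
      = (List.range (q + 1)).map (fun j => ((xs.drop (j * 10)).take 10).flatMap pvF) := by
    apply List.map_congr_left
    intro j _
    exact hrow j
  rw [hmaps, List.range_succ, List.map_append, List.map_singleton, pvJoinSnoc, List.flatMap_map]
  rw [List.take_of_length_le (by
    rw [List.length_drop]
    have := Nat.mod_lt n (show 0 < 10 by norm_num)
    omega)]

-- ===== VERDICT (by name: the statement is the Claim_ definition above) =====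
theorem fn_format_flow_values_spec : Claim_equal_fn_format_flow_values := by
  intro xs _
  unfold Spec_fn_format_flow_values
  exact String.toList_inj.mp ((pvAChars xs).trans (pvBChars xs).symm)
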